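-- pv_equiv track=rewrite | github.com/Sardor0047/dictionary_beginner_homework | find_max_key.py | find_max_key
-- ===== SOURCE A (Python) =====
-- def find_max_key(data: dict):
--     """
--     Return the maximum int or float key in a dictionary.
--     Args:
--         data (dict): A dictionary of values
--     Returns:
--         int: The maximum key in the dictionary.
--     """
--     res = []
--     for i in data.keys():
--         res.append(i)
--     min = res[0]
--     for i in res:
--         if i > min:
--             min = i
--     return min
-- ===== SOURCE B (Python) =====
-- def find_max_key(data: dict):
--     """
--     Return the maximum int or float key in a dictionary.
--     Args:
--         data (dict): A dictionary of values
--     Returns: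
--         int: The maximum key in the dictionary.
--     """
--     return sorted(data.keys())[-1]
-- ===== Notes on version B (the rewrite author's own statement) =====
-- stated objective: idiomatic
-- what changed: B sorts the keys and takes the last element instead of copying the keys into a list and scanning it with a running maximum; on the empty dict B's [-1] raises IndexError exactly like A's res[0].
-- outside the precondition, e.g. on find_max_key({}): A raises IndexError, B raises IndexError
import Mathlib
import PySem

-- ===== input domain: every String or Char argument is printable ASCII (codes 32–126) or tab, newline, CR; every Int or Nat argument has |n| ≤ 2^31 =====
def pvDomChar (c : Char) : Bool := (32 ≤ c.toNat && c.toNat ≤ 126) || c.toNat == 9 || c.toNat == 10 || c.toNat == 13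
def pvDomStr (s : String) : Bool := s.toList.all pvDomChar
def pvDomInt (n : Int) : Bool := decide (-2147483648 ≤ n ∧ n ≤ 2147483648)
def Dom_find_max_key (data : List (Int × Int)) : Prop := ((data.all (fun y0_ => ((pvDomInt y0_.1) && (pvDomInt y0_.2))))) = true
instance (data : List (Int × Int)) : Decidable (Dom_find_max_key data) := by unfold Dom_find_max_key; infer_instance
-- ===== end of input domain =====

-- B sorts the keys and takes the last element instead of scanning with a running maximum; same behaviour on every non-empty dict (the empty dict, where A's res[0] raises IndexError, is excluded by Pre_).


-- ===== PORT A =====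
-- res = list(data.keys()); min = res[0]; then a linear scan keeping the running maximum
def find_max_key (data : List (Int × Int)) : Int :=
  let res := (PySem.Dict.ofList data).keys
  let m0 := (PySem.List.pyGet? res 0).getD 0   -- res[0]; none (IndexError) only outside Pre_
  res.foldl (fun mn i => if i > mn then i else mn) m0

-- ===== PORT B =====
-- sorted(data.keys())[-1]
def find_max_key_alt (data : List (Int × Int)) : Int :=
  (PySem.List.pyGet? (PySem.List.sorted (PySem.Dict.ofList data).keys (fun x => x) false) (-1)).getD 0

-- ===== PRECONDITION & SPEC =====
-- Pre_ excludes only the empty dict, on which both A (res[0]) and B (sorted(...)[-1]) raise IndexError.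
def Pre_find_max_key (data : List (Int × Int)) : Prop := data ≠ []
instance (data : List (Int × Int)) : Decidable (Pre_find_max_key data) := by unfold Pre_find_max_key; infer_instance
def pvWitness_find_max_key : (List (Int × Int)) := [(3, 1), (7, 2), (5, 0)]
def Spec_find_max_key (data : List (Int × Int)) (out : Int) : Prop := out = find_max_key_alt data
instance (data : List (Int × Int)) (out : Int) : Decidable (Spec_find_max_key data out) := by unfold Spec_find_max_key; infer_instance

-- ===== CLAIM (what is proved, stated in full; the proofs are below) =====
def Claim_equal_find_max_key : Prop := ∀ (data : List (Int × Int)), Dom_find_max_key data → Pre_find_max_key data → Spec_find_max_key data (find_max_key data)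

-- ===== LEMMAS AND PROOFS =====

-- A's running-maximum update is Int.max
theorem foldl_scan_max (t : List Int) (acc : Int) :
    t.foldl (fun mn i => if i > mn then i else mn) acc = t.foldl max acc := by
  induction t generalizing acc with
  | nil => rfl
  | cons x xs ih =>
      simp only [List.foldl_cons, ih]
      congr 1
      by_cases h : x > acc
      · simp [max_eq_right (le_of_lt h), if_pos h]
      · simp [max_eq_left (le_of_not_gt h), if_neg h]

theorem foldl_max_mem (t : List Int) (acc : Int) :
    t.foldl max acc = acc ∨ t.foldl max acc ∈ t := by
  induction t generalizing acc with
  | nil => exact Or.inl rfl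
  | cons x xs ih =>
      simp only [List.foldl_cons]
      rcases ih (max acc x) with h | h
      · rcases max_choice acc x with hm | hm
        · exact Or.inl (by rw [h, hm])
        · exact Or.inr (by rw [h, hm]; exact List.mem_cons_self)
      · exact Or.inr (List.mem_cons_of_mem _ h)

theorem le_foldl_max (t : List Int) (acc : Int) :
    acc ≤ t.foldl max acc ∧ ∀ y ∈ t, y ≤ t.foldl max acc := by
  induction t generalizing acc with
  | nil => exact ⟨le_refl _, by simp⟩
  | cons x xs ih =>
      obtain ⟨h1, h2⟩ := ih (max acc x)
      refine ⟨le_trans (le_max_left _ _) h1, ?_⟩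
      intro y hy
      rcases List.mem_cons.mp hy with rfl | hy
      · exact le_trans (le_max_right _ _) h1
      · exact h2 y hy

-- in a ≤-sorted list every element is ≤ the last one
theorem le_getLast_of_pairwise (l : List Int) (hp : l.Pairwise (· ≤ ·)) (h : l ≠ []) :
    ∀ x ∈ l, x ≤ l.getLast h := by
  induction l with
  | nil => exact absurd rfl h
  | cons a t ih =>
      intro x hx
      cases t with
      | nil => simp at hx; simp [List.getLast, hx]
      | cons b u =>
          rw [List.getLast_cons (by simp)]
          have hbu : (b :: u) ≠ [] := by simp
          rcases List.mem_cons.mp hx with rfl | hx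
          · exact le_trans (List.rel_of_pairwise_cons hp List.mem_cons_self)
              (ih hp.of_cons hbu b List.mem_cons_self)
          · exact ih hp.of_cons hbu x hx

theorem keys_ofList_eq (data : List (Int × Int)) :
    (PySem.Dict.ofList data).keys = PySem.Set.ofList (data.map Prod.fst) := by
  simp [PySem.Dict.ofList, PySem.Dict.update, PySem.Set.ofList_eq_foldl, PySem.Set.update,
    PySem.Dict.keys_foldl_insert_key (key := Prod.fst) (f := fun d p => p.2)]

theorem keys_ne_nil (data : List (Int × Int)) (h : data ≠ []) :
    (PySem.Dict.ofList data).keys ≠ [] := by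
  rw [keys_ofList_eq]
  cases data with
  | nil => exact absurd rfl h
  | cons p rest =>
      intro hk
      have : p.1 ∈ PySem.Set.ofList ((p :: rest).map Prod.fst) := by
        rw [PySem.Set.mem_ofList]; simp
      rw [hk] at this
      exact absurd this (List.not_mem_nil)

theorem find_max_key_spec : Claim_equal_find_max_key := by
  intro data _ hpre
  unfold Spec_find_max_key find_max_key find_max_key_alt
  set ks := (PySem.Dict.ofList data).keys with hks
  show ks.foldl (fun mn i => if i > mn then i else mn) ((PySem.List.pyGet? ks 0).getD 0)
      = (PySem.List.pyGet? (PySem.List.sorted ks (fun x => x) false) (-1)).getD 0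
  have hne : ks ≠ [] := keys_ne_nil data hpre
  obtain ⟨k, t, hkt⟩ := List.exists_cons_of_ne_nil hne
  -- A's value
  have hA0 : (PySem.List.pyGet? ks 0).getD 0 = k := by
    rw [hkt, PySem.List.pyGet?_zero_cons]; rfl
  rw [hA0, foldl_scan_max]
  set aV := ks.foldl max k with haV
  have haMem : aV ∈ ks := by
    rw [haV, hkt]
    simp only [List.foldl_cons, max_self]
    rcases foldl_max_mem t k with h | h
    · rw [h]; exact List.mem_cons_self
    · exact List.mem_cons_of_mem _ h
  have haGe : ∀ y ∈ ks, y ≤ aV := by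
    rw [haV, hkt]
    intro y hy
    simp only [List.foldl_cons, max_self]
    rcases List.mem_cons.mp hy with rfl | hy
    · exact (le_foldl_max t y).1
    · exact (le_foldl_max t k).2 y hy
  -- B's value
  set s := PySem.List.sorted ks (fun x => x) false with hs
  have hsne : s ≠ [] := by
    rw [hs]; intro hnil
    exact hne ((PySem.List.sorted_eq_nil_iff ks (fun x => x) false).mp hnil)
  have hBget : PySem.List.pyGet? s (-1) = some (s.getLast hsne) := by
    rw [PySem.List.pyGet?_neg_one, List.getLast?_eq_some_getLast hsne]
  rw [hBget]
  set bV := s.getLast hsne with hbV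
  have hbMem : bV ∈ ks := by
    have := List.getLast_mem hsne
    rw [← hbV] at this
    rwa [PySem.List.mem_sorted] at this
  have hbGe : ∀ y ∈ ks, y ≤ bV := by
    intro y hy
    have hys : y ∈ s := by rw [hs, PySem.List.mem_sorted]; exact hy
    have hp : s.Pairwise (fun a b => a ≤ b) := by
      simpa using PySem.List.sorted_pairwise (xs := ks) (key := fun x => x)
    exact le_getLast_of_pairwise s hp hsne y hys
  have h1 : aV ≤ bV := hbGe aV haMem
  have h2 : bV ≤ aV := haGe bV hbMem
  simp only [Option.getD_some]
  omega
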